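-- pv_equiv track=rewrite | github.com/1101-Godfrey-Megan/CL-417A-Final-Project-Trans-Tokenization | repetition_test.py | repetition_count
-- ===== SOURCE A (Python) =====
-- def find_repetitions(text, min_repeat=3):
--     tokens = text.split()
--     reps = []
--     count = 1
--     for i in range(1, len(tokens)):
--         if tokens[i] == tokens[i-1]:
--             count += 1
--         else:
--             if count > min_repeat:
--                 reps.append((tokens[i-1], count))
--             count = 1
--     if count > min_repeat:
--         reps.append((tokens[-1], count))
--     return reps
--
-- def repetition_count(preds, refs):
--     total = 0
--     details = []
--     for pred, ref in zip(preds, refs):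
--         reps = find_repetitions(pred)
--         for token, count in reps:
--             if token not in ref.split():
--                 total += 1
--                 details.append((token, count, pred))
--     return total, details
-- ===== SOURCE B (Python) =====
-- def find_repetitions(text, min_repeat=3):
--     # staged passes: mark the run boundaries, then read runs off adjacent boundary pairs
--     tokens = text.split()
--     n = len(tokens)
--     bounds = [0] + [i + 1 for i in range(n - 1) if tokens[i] != tokens[i + 1]] + [n]
--     return [(tokens[s], e - s) for s, e in zip(bounds, bounds[1:]) if e - s > min_repeat]
--
-- def repetition_count(preds, refs):
--     details = [(token, count, pred)
--                for pred, ref in zip(preds, refs)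
--                for token, count in find_repetitions(pred)
--                if token not in ref.split()]
--     return len(details), details
-- ===== Notes on version B (the rewrite author's own statement) =====
-- stated objective: alternative
-- what changed: find_repetitions is rewritten as two staged passes: it first builds the list of run-boundary indices (positions where adjacent tokens differ, plus 0 and n) and then reads each run off adjacent boundary pairs as (tokens[s], e-s), instead of A's sequential scan with a running counter and tail flush; repetition_count collects details in one comprehension and returns its length as the total.
import Mathlib
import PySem

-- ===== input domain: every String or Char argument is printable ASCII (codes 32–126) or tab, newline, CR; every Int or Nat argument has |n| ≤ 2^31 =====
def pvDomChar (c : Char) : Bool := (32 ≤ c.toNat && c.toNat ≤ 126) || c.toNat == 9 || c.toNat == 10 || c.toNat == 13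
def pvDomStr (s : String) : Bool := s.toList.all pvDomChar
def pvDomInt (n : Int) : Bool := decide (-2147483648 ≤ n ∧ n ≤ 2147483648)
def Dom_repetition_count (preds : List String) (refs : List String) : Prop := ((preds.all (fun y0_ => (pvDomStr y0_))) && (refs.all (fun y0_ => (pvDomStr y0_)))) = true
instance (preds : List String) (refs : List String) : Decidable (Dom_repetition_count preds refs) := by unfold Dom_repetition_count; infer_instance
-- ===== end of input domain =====

-- B replaces A's sequential run scan (running counter + tail flush) by two staged passes:
-- first the list of run-boundary indices, then runs read off adjacent boundary pairs (alternative decomposition, same cost).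

-- ===== PORT A =====
-- find_repetitions(text) with the default min_repeat=3 (the only call site)
def findRepsA (text : String) : List (String × Int) :=
  let tokens := PySem.Str.split₀ text
  let st := (PySem.List.pyRange 1 (tokens.length : Int) 1).foldl
    (fun (st : List (String × Int) × Int) i =>
      if (PySem.List.pyGet? tokens i).getD "" == (PySem.List.pyGet? tokens (i-1)).getD ""
      then (st.1, st.2 + 1)
      else ((if st.2 > 3 then st.1 ++ [((PySem.List.pyGet? tokens (i-1)).getD "", st.2)] else st.1), 1))
    ([], 1)
  if st.2 > 3 then st.1 ++ [((PySem.List.pyGet? tokens (-1)).getD "", st.2)] else st.1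

def repetition_count (preds : List String) (refs : List String) : Int × (List (String × Int × String)) :=
  (preds.zip refs).foldl
    (fun (st : Int × List (String × Int × String)) pr =>
      (findRepsA pr.1).foldl
        (fun (st2 : Int × List (String × Int × String)) tc =>
          if !(PySem.Str.split₀ pr.2).contains tc.1
          then (st2.1 + 1, st2.2 ++ [(tc.1, tc.2, pr.1)])
          else st2)
        st)
    (0, [])

-- ===== PORT B =====
-- bounds = [0] + [i+1 for i in range(n-1) if tokens[i] != tokens[i+1]] + [n];
-- runs read off adjacent boundary pairs: [(tokens[s], e-s) for s,e in zip(bounds, bounds[1:]) if e-s > 3]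
def findRepsB (text : String) : List (String × Int) :=
  let tokens := PySem.Str.split₀ text
  let n : Int := (tokens.length : Int)
  let bounds : List Int :=
    [0] ++ ((PySem.List.pyRange 0 (n - 1) 1).filter
        (fun i => !((PySem.List.pyGet? tokens i).getD "" == (PySem.List.pyGet? tokens (i + 1)).getD ""))).map (· + 1)
      ++ [n]
  ((bounds.zip (PySem.List.slice bounds (some 1) none)).filter
      (fun se => decide (se.2 - se.1 > 3))).map
    (fun se => ((PySem.List.pyGet? tokens se.1).getD "", se.2 - se.1))

def repetition_count_alt (preds : List String) (refs : List String) : Int × (List (String × Int × String)) :=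
  let details := (preds.zip refs).flatMap (fun pr =>
    ((findRepsB pr.1).filter (fun tc => !(PySem.Str.split₀ pr.2).contains tc.1)).map
      (fun tc => (tc.1, tc.2, pr.1)))
  ((details.length : Int), details)

-- ===== PRECONDITION & SPEC =====
def Spec_repetition_count (preds : List String) (refs : List String) (out : Int × (List (String × Int × String))) : Prop := out = repetition_count_alt preds refs
instance (preds : List String) (refs : List String) (out : Int × (List (String × Int × String))) : Decidable (Spec_repetition_count preds refs out) := by unfold Spec_repetition_count; infer_instance

-- ===== CLAIM (what is proved, stated in full; the proofs are below) =====
def Claim_equal_repetition_count : Prop := ∀ (preds : List String) (refs : List String), Dom_repetition_count preds refs → Spec_repetition_count preds refs (repetition_count preds refs)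

-- ===== LEMMAS AND PROOFS =====

-- structural form of A's loop: state = (reps, count), prev carried explicitly
def loopA (prev : String) (count : Int) (acc : List (String × Int)) :
    List String → (List (String × Int)) × Int × String
  | [] => (acc, count, prev)
  | cur :: rest =>
    if cur == prev then loopA cur (count + 1) acc rest
    else loopA cur 1 (if count > 3 then acc ++ [(prev, count)] else acc) rest

-- run-grouping with an open current run (prev, count)
def runsAux (prev : String) (count : Int) : List String → List (String × Int)
  | [] => if count > 3 then [(prev, count)] else []
  | x :: xs =>
    if x == prev then runsAux prev (count + 1) xs
    else (if count > 3 then [(prev, count)] else []) ++ runsAux x 1 xs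

-- run-length encoding: prepend one token to an encoding
def consRun (p : String) (c : Int) : List (String × Int) → List (String × Int)
  | [] => [(p, c)]
  | (u, d) :: rs => if u == p then (p, c + d) :: rs else (p, c) :: (u, d) :: rs

def runsAll : List String → List (String × Int)
  | [] => []
  | t :: rest => consRun t 1 (runsAll rest)

-- B-side proof-side descriptions: boundary lists over Nat
def innerN (ts : List String) : List Nat :=
  (List.range (ts.length - 1)).filter (fun j => !(ts.getD j "" == ts.getD (j + 1) ""))

def bndsN (ts : List String) : List Nat :=
  0 :: ((innerN ts).map (· + 1) ++ [ts.length])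

def adj : List Nat → List (Nat × Nat)
  | a :: b :: l => (a, b) :: adj (b :: l)
  | _ => []

def pairF (ts : List String) : Nat × Nat → String × Int :=
  fun se => (ts.getD se.1 "", (se.2 : Int) - (se.1 : Int))

def pairsAll (ts : List String) : List (String × Int) := (adj (bndsN ts)).map (pairF ts)

-- ===== A-side lemmas =====

theorem loopA_snd_snd (rest : List String) : ∀ prev count acc,
    (loopA prev count acc rest).2.2 = rest.getLastD prev := by
  induction rest with
  | nil => intros; simp [loopA]
  | cons cur rest ih =>
    intro prev count acc
    simp only [loopA]
    split
    · rw [ih]; cases rest <;> simp [List.getLastD]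
    · rw [ih]; cases rest <;> simp [List.getLastD]

theorem pyGet?_append_length {pre : List String} {t : String} (l : List String) :
    (PySem.List.pyGet? (pre ++ t :: l) ((pre.length : Int))).getD "" = t := by
  simp [PySem.List.pyGet?, PySem.List.pyIdx?]

theorem rangeFold_eq_loopA (rest : List String) : ∀ (pre : List String) (t : String)
    (acc : List (String × Int)) (count : Int),
    (PySem.List.pyRange ((pre.length : Int) + 1) (((pre ++ t :: rest).length : Int)) 1).foldl
      (fun (st : List (String × Int) × Int) i =>
        if (PySem.List.pyGet? (pre ++ t :: rest) i).getD "" ==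
           (PySem.List.pyGet? (pre ++ t :: rest) (i-1)).getD ""
        then (st.1, st.2 + 1)
        else ((if st.2 > 3 then st.1 ++ [((PySem.List.pyGet? (pre ++ t :: rest) (i-1)).getD "", st.2)] else st.1), 1))
      (acc, count)
    = ((loopA t count acc rest).1, (loopA t count acc rest).2.1) := by
  induction rest with
  | nil =>
    intro pre t acc count
    rw [PySem.List.pyRange_one_eq_nil (by simp)]
    simp [loopA]
  | cons cur rest ih =>
    intro pre t acc count
    have hlen : ((pre.length : Int) + 1) < (((pre ++ t :: cur :: rest).length : Int)) := by
      simp only [List.length_append, List.length_cons]; push_cast; omega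
    rw [PySem.List.pyRange_one_cons hlen]
    simp only [List.foldl_cons]
    have hprev : (PySem.List.pyGet? (pre ++ t :: cur :: rest) ((pre.length : Int) + 1 - 1)).getD "" = t := by
      have := pyGet?_append_length (pre := pre) (t := t) (cur :: rest)
      rw [show ((pre.length : Int) + 1 - 1) = (pre.length : Int) by ring]
      exact this
    have hcur : (PySem.List.pyGet? (pre ++ t :: cur :: rest) ((pre.length : Int) + 1)).getD "" = cur := by
      have h2 := pyGet?_append_length (pre := pre ++ [t]) (t := cur) rest
      rw [show ((pre.length : Int) + 1) = (((pre ++ [t]).length : Nat) : Int) by simp]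
      simpa [List.append_assoc] using h2
    rw [hprev, hcur]
    rw [show pre ++ t :: cur :: rest = (pre ++ [t]) ++ cur :: rest from by simp]
    rw [show ((pre.length : Int) + 1 + 1) = (((pre ++ [t]).length : Int) + 1) from by simp]
    by_cases h : cur == t
    · have heq : cur = t := by simpa using h
      subst heq
      simp only [loopA, beq_self_eq_true, if_true]
      exact ih (pre ++ [cur]) cur acc (count + 1)
    · rw [if_neg (by simpa using h)]
      simp only [loopA, h, Bool.false_eq_true, if_false]
      exact ih (pre ++ [t]) cur _ 1

theorem loopA_flush_eq_runsAux (rest : List String) : ∀ prev count acc,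
    (if (loopA prev count acc rest).2.1 > 3
     then (loopA prev count acc rest).1 ++ [((loopA prev count acc rest).2.2, (loopA prev count acc rest).2.1)]
     else (loopA prev count acc rest).1)
    = acc ++ runsAux prev count rest := by
  induction rest with
  | nil =>
    intro prev count acc
    simp only [loopA, runsAux]
    split <;> simp
  | cons cur rest ih =>
    intro prev count acc
    by_cases h : cur == prev
    · have heq : cur = prev := by simpa using h
      subst heq
      simp only [loopA, runsAux, beq_self_eq_true, if_true]
      exact ih cur (count + 1) acc
    · simp only [loopA, runsAux, h, Bool.false_eq_true, if_false]
      rw [ih cur 1 _]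
      split <;> simp

theorem pyGet?_neg_one_getLast (xs : List String) (h : xs ≠ []) :
    (PySem.List.pyGet? xs (-1)).getD "" = xs.getLast h := by
  simp only [PySem.List.pyGet?, PySem.List.pyIdx?]
  have hl : 0 < xs.length := List.length_pos_iff.mpr h
  rw [if_neg (by omega), if_pos (by omega : -(xs.length:Int) ≤ -1)]
  have hk : (- (-1) : Int).toNat = 1 := by decide
  rw [hk, Option.bind_some, List.getLast_eq_getElem]
  simp [List.getElem?_eq_getElem (by omega : xs.length - 1 < xs.length)]

-- ===== encoding lemmas =====

theorem consRun_shape (p : String) (c : Int) (rl : List (String × Int)) :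
    ∃ d tl, consRun p c rl = (p, d) :: tl := by
  cases rl with
  | nil => exact ⟨c, [], rfl⟩
  | cons h tl =>
    obtain ⟨u, d⟩ := h
    by_cases hu : (u == p) = true
    · exact ⟨c + d, tl, by simp [consRun, hu]⟩
    · exact ⟨c, (u, d) :: tl, by simp [consRun, hu]⟩

theorem consRun_consRun (p : String) (c : Int) (rl : List (String × Int)) :
    consRun p c (consRun p 1 rl) = consRun p (c + 1) rl := by
  cases rl with
  | nil => simp [consRun]
  | cons h tl =>
    obtain ⟨u, d⟩ := h
    by_cases hu : (u == p) = true
    · simp only [consRun, hu, if_true, beq_self_eq_true]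
      have harith : c + (1 + d) = c + 1 + d := by ring
      rw [harith]
    · simp [consRun, hu]

theorem runsAux_eq_filter (rest : List String) : ∀ prev count,
    runsAux prev count rest
      = (consRun prev count (runsAll rest)).filter (fun tc => decide (tc.2 > 3)) := by
  induction rest with
  | nil =>
    intro prev count
    simp only [runsAux, runsAll, consRun]
    by_cases h : count > 3 <;> simp [h]
  | cons x xs ih =>
    intro prev count
    by_cases hx : (x == prev) = true
    · have heq : x = prev := by simpa using hx
      subst heq
      simp only [runsAux, beq_self_eq_true, if_true, runsAll]
      rw [ih, consRun_consRun]
    · have hx' : (x == prev) = false := beq_eq_false_iff_ne.mpr (by simpa using hx)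
      simp only [runsAux, hx', Bool.false_eq_true, if_false, runsAll]
      rw [ih x 1]
      obtain ⟨d, tl, hC⟩ := consRun_shape x 1 (runsAll xs)
      rw [hC]
      simp only [consRun, hx', Bool.false_eq_true, if_false]
      rw [List.filter_cons]
      by_cases h : count > 3 <;> simp [h, List.filter_cons]

-- ===== B-side lemmas =====

theorem zip_tail_eq_adj : ∀ l : List Nat, l.zip l.tail = adj l
  | [] => rfl
  | [_] => rfl
  | a :: b :: l => by
    simp only [List.tail_cons, List.zip_cons_cons, adj]
    exact congrArg _ (zip_tail_eq_adj (b :: l))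

theorem adj_map_succ : ∀ l : List Nat,
    adj (l.map (· + 1)) = (adj l).map (fun se => (se.1 + 1, se.2 + 1))
  | [] => rfl
  | [_] => rfl
  | a :: b :: l => by
    simp only [List.map_cons, adj, List.map]
    exact congrArg _ (adj_map_succ (b :: l))

theorem pairF_shift (t : String) (rest : List String) :
    (pairF (t :: rest)) ∘ (fun se : Nat × Nat => (se.1 + 1, se.2 + 1)) = pairF rest := by
  funext se
  simp only [pairF, Function.comp_apply, List.getD_cons_succ, Prod.mk.injEq, true_and]
  push_cast; ring

theorem innerN_cons (t r : String) (rs : List String) :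
    innerN (t :: r :: rs) = (if t == r then [] else [0]) ++ (innerN (r :: rs)).map (· + 1) := by
  unfold innerN
  have h1 : (t :: r :: rs).length - 1 = rs.length + 1 := by simp
  have h2 : (r :: rs).length - 1 = rs.length := by simp
  rw [h1, h2, List.range_succ_eq_map, List.filter_cons, List.filter_map]
  have hp : ((fun j => !((t :: r :: rs).getD j "" == (t :: r :: rs).getD (j + 1) "")) ∘ Nat.succ)
      = fun j => !((r :: rs).getD j "" == (r :: rs).getD (j + 1) "") := by
    funext j
    simp [Function.comp, Nat.succ_eq_add_one, List.getD_cons_succ]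
  rw [hp]
  have hmap : List.map Nat.succ = List.map (fun j : Nat => j + 1) := by
    funext l; congr 1
  rw [hmap]
  by_cases ht : (t == r) = true
  · simp [List.getD_cons_zero, List.getD_cons_succ, ht]
  · simp [List.getD_cons_zero, List.getD_cons_succ, ht]

theorem bndsN_merge (r : String) (rs : List String) :
    bndsN (r :: r :: rs) = 0 :: ((bndsN (r :: rs)).tail).map (· + 1) := by
  unfold bndsN
  rw [innerN_cons]
  simp [List.map_map, List.map_append, Function.comp]

theorem bndsN_split (t r : String) (rs : List String) (h : (t == r) = false) :
    bndsN (t :: r :: rs) = 0 :: (bndsN (r :: rs)).map (· + 1) := by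
  unfold bndsN
  rw [innerN_cons, h]
  simp [List.map_map, List.map_append, Function.comp]

theorem pairsAll_cons (rest : List String) : ∀ t, pairsAll (t :: rest) = runsAll (t :: rest) := by
  induction rest with
  | nil =>
    intro t
    simp [pairsAll, bndsN, innerN, adj, runsAll, consRun, pairF]
  | cons r rs ih =>
    intro t
    have hne : (innerN (r :: rs)).map (· + 1) ++ [(r :: rs).length] ≠ [] := by simp
    obtain ⟨b, l, hT⟩ := List.exists_cons_of_ne_nil hne
    have hB : bndsN (r :: rs) = 0 :: b :: l := by rw [bndsN, hT]
    have hrsAll : runsAll (r :: rs) = (r, (b : Int)) :: (adj (b :: l)).map (pairF (r :: rs)) := by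
      rw [← ih r]
      unfold pairsAll
      rw [hB]
      simp [adj, pairF]
    by_cases ht : (t == r) = true
    · have heq : t = r := by simpa using ht
      subst heq
      unfold pairsAll
      rw [bndsN_merge]
      have htail : (bndsN (t :: rs)).tail = b :: l := by
        rw [bndsN, List.tail_cons, hT]
      rw [htail]
      have hadj : adj (0 :: (b :: l).map (· + 1)) = (0, b + 1) :: adj ((b :: l).map (· + 1)) := by
        simp only [List.map_cons, adj]
      rw [hadj, adj_map_succ, List.map_cons, List.map_map, pairF_shift]
      have hhead : pairF (t :: t :: rs) (0, b + 1) = (t, (b : Int) + 1) := by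
        simp only [pairF, List.getD_cons_zero, Prod.mk.injEq, true_and]
        push_cast
        ring
      rw [hhead]
      rw [show runsAll (t :: t :: rs) = consRun t 1 (runsAll (t :: rs)) from rfl, hrsAll]
      simp only [consRun, beq_self_eq_true, if_true]
      have harith : (b : Int) + 1 = 1 + (b : Int) := by ring
      rw [harith]
      try simp
    · have htne : t ≠ r := by simpa using ht
      have hx : (t == r) = false := beq_eq_false_iff_ne.mpr htne
      have hrt : (r == t) = false := beq_eq_false_iff_ne.mpr (Ne.symm htne)
      unfold pairsAll
      rw [bndsN_split t r rs hx, hB]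
      have hadj : adj (0 :: (0 :: b :: l).map (· + 1)) = (0, 1) :: adj ((0 :: b :: l).map (· + 1)) := by
        simp only [List.map_cons, adj]
      rw [hadj, adj_map_succ, List.map_cons, List.map_map, pairF_shift]
      have hhead : pairF (t :: r :: rs) (0, 1) = (t, 1) := by
        simp [pairF]
      rw [hhead]
      have htl : (adj (0 :: b :: l)).map (pairF (r :: rs)) = runsAll (r :: rs) := by
        rw [← hB]
        exact ih r
      rw [htl]
      rw [show runsAll (t :: r :: rs) = consRun t 1 (runsAll (r :: rs)) from rfl, hrsAll]
      simp only [consRun, hrt, Bool.false_eq_true, if_false]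
      try simp

theorem bounds_cast (ts : List String) :
    ([(0:Int)] ++ ((PySem.List.pyRange 0 ((ts.length : Int) - 1) 1).filter
        (fun i => !((PySem.List.pyGet? ts i).getD "" == (PySem.List.pyGet? ts (i + 1)).getD ""))).map (· + 1)
      ++ [(ts.length : Int)])
    = (bndsN ts).map (fun n : Nat => (n : Int)) := by
  have h1 : PySem.List.pyRange 0 ((ts.length : Int) - 1) 1
      = (List.range (ts.length - 1)).map (fun k : Nat => (k : Int)) := by
    rw [PySem.List.pyRange_one]
    have h0 : ((ts.length : Int) - 1 - 0).toNat = ts.length - 1 := by omega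
    rw [h0]
    simp
  rw [h1, List.filter_map, List.map_map]
  have h2 : ((fun i : Int => !((PySem.List.pyGet? ts i).getD "" == (PySem.List.pyGet? ts (i + 1)).getD ""))
      ∘ (fun k : Nat => (k : Int)))
      = fun j : Nat => !(ts.getD j "" == ts.getD (j + 1) "") := by
    funext j
    simp only [Function.comp_apply]
    rw [show ((j : Int) + 1) = ((j + 1 : Nat) : Int) from by push_cast; ring]
    rw [PySem.List.pyGet?_natCast, PySem.List.pyGet?_natCast]
    simp [List.getD_eq_getElem?_getD]
  rw [h2]
  unfold bndsN innerN
  have h3 : ((fun x : Int => x + 1) ∘ fun k : Nat => (k : Int))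
      = (fun k : Nat => (k : Int)) ∘ (fun j : Nat => j + 1) := by
    funext k; simp
  rw [h3, ← List.map_map]
  simp [List.map_append]

theorem findRepsA_eq (text : String) :
    findRepsA text = (runsAll (PySem.Str.split₀ text)).filter (fun tc => decide (tc.2 > 3)) := by
  unfold findRepsA
  cases htk : PySem.Str.split₀ text with
  | nil => simp [PySem.List.pyRange_one_eq_nil, runsAll]
  | cons t rest =>
    simp only []
    have hrf := rangeFold_eq_loopA rest [] t [] 1
    simp only [List.nil_append, List.length_nil, Nat.cast_zero, zero_add] at hrf
    rw [hrf]
    have hlast : (PySem.List.pyGet? (t :: rest) (-1)).getD "" = (loopA t 1 [] rest).2.2 := by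
      rw [loopA_snd_snd, pyGet?_neg_one_getLast (t :: rest) (by simp)]
      cases rest with
      | nil => simp [List.getLastD]
      | cons a l => simp [List.getLast_cons, List.getLastD]
    rw [hlast]
    rw [loopA_flush_eq_runsAux rest t 1 []]
    rw [List.nil_append, runsAux_eq_filter]
    rfl

theorem pairsFilter_eq_runs (ts : List String) :
    ((adj (bndsN ts)).map (pairF ts)).filter (fun tc => decide (tc.2 > 3))
      = (runsAll ts).filter (fun tc => decide (tc.2 > 3)) := by
  cases ts with
  | nil => simp [adj, bndsN, innerN, pairF, runsAll]
  | cons t rest =>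
    rw [show (adj (bndsN (t :: rest))).map (pairF (t :: rest)) = pairsAll (t :: rest) from rfl,
      pairsAll_cons]


theorem findRepsB_eq (text : String) :
    findRepsB text = (runsAll (PySem.Str.split₀ text)).filter (fun tc => decide (tc.2 > 3)) := by
  simp only [findRepsB]
  rw [bounds_cast (PySem.Str.split₀ text), PySem.List.slice_from_one,
    ← List.map_tail, List.zip_map, zip_tail_eq_adj, List.filter_map, List.map_map]
  have hfun : ((fun se : Int × Int => ((PySem.List.pyGet? (PySem.Str.split₀ text) se.1).getD "", se.2 - se.1))
      ∘ Prod.map (fun n : Nat => (n : Int)) (fun n : Nat => (n : Int)))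
      = pairF (PySem.Str.split₀ text) := by
    funext se
    simp [pairF, Prod.map, PySem.List.pyGet?_natCast, List.getD_eq_getElem?_getD]
  have hpred : ((fun se : Int × Int => decide (se.2 - se.1 > 3))
      ∘ Prod.map (fun n : Nat => (n : Int)) (fun n : Nat => (n : Int)))
      = (fun tc : String × Int => decide (tc.2 > 3)) ∘ pairF (PySem.Str.split₀ text) := by
    funext se
    simp [pairF, Prod.map]
  rw [hfun, hpred, ← List.filter_map]
  exact pairsFilter_eq_runs (PySem.Str.split₀ text)


theorem findReps_eq (text : String) : findRepsA text = findRepsB text := by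
  rw [findRepsA_eq, findRepsB_eq]

theorem inner_fold (p : (String × Int) → Bool) (g : (String × Int) → (String × Int × String))
    (l : List (String × Int)) : ∀ (st : Int × List (String × Int × String)),
    l.foldl (fun st2 tc => if p tc then (st2.1 + 1, st2.2 ++ [g tc]) else st2) st
    = (st.1 + ((l.filter p).length : Int), st.2 ++ (l.filter p).map g) := by
  induction l with
  | nil => intro st; simp
  | cons x xs ih =>
    intro st
    simp only [List.foldl_cons, List.filter_cons]
    by_cases hx : p x
    · rw [hx, if_pos rfl, ih]
      simp only [if_true, List.length_cons, List.map_cons, Prod.mk.injEq]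
      constructor
      · push_cast; ring
      · simp
    · simp only [hx, Bool.false_eq_true, if_false, ih]

theorem outer_fold (h : (String × String) → List (String × Int × String))
    (L : List (String × String)) : ∀ (st : Int × List (String × Int × String)),
    L.foldl (fun st pr => (st.1 + ((h pr).length : Int), st.2 ++ h pr)) st
    = (st.1 + ((L.flatMap h).length : Int), st.2 ++ L.flatMap h) := by
  induction L with
  | nil => intro st; simp
  | cons x xs ih =>
    intro st
    simp only [List.foldl_cons, ih, List.flatMap_cons, Prod.mk.injEq]
    constructor
    · push_cast [List.length_append]; ring
    · simp

-- ===== VERDICT (by name: the statement is the Claim_ definition above) =====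
set_option maxHeartbeats 800000 in
theorem repetition_count_spec : Claim_equal_repetition_count := by
  intro preds refs _
  unfold Spec_repetition_count repetition_count repetition_count_alt
  have hbody : ∀ (st : Int × List (String × Int × String)) (pr : String × String),
      (findRepsA pr.1).foldl
        (fun (st2 : Int × List (String × Int × String)) tc =>
          if !(PySem.Str.split₀ pr.2).contains tc.1
          then (st2.1 + 1, st2.2 ++ [(tc.1, tc.2, pr.1)])
          else st2) st
      = (st.1 + ((((findRepsB pr.1).filter (fun tc => !(PySem.Str.split₀ pr.2).contains tc.1)).map
            (fun tc => (tc.1, tc.2, pr.1))).length : Int),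
         st.2 ++ ((findRepsB pr.1).filter (fun tc => !(PySem.Str.split₀ pr.2).contains tc.1)).map
            (fun tc => (tc.1, tc.2, pr.1))) := by
    intro st pr
    rw [findReps_eq]
    rw [inner_fold (fun tc => !(PySem.Str.split₀ pr.2).contains tc.1) (fun tc => (tc.1, tc.2, pr.1))]
    rw [List.length_map]
  simp only [hbody]
  rw [outer_fold (fun pr => ((findRepsB pr.1).filter (fun tc => !(PySem.Str.split₀ pr.2).contains tc.1)).map
        (fun tc => (tc.1, tc.2, pr.1)))]
  rw [zero_add, List.nil_append]
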